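-- pv_equiv track=rewrite | github.com/jonas-scholz123/warm-start-model | src/cdnp/model/util.py | round_up_to_power_of_two
-- ===== SOURCE A (Python) =====
-- def round_up_to_power_of_two(n):
--     if n < 1:
--         raise ValueError("Input must be a positive integer.")
--     if (n & (n - 1)) == 0:
--         return n  # Already a power of two
--     power = 1
--     while power < n:
--         power <<= 1
--     return power
-- ===== SOURCE B (Python) =====
-- def round_up_to_power_of_two(n):
--     if n < 1:
--         raise ValueError("Input must be a positive integer.")
--     return 1 << (n - 1).bit_length()
-- ===== Notes on version B (the rewrite author's own statement) =====
-- stated objective: idiomatic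
-- what changed: Replaced the power-of-two special case plus doubling loop with the closed-form bit-length expression 1 << (n-1).bit_length().
import Mathlib
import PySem

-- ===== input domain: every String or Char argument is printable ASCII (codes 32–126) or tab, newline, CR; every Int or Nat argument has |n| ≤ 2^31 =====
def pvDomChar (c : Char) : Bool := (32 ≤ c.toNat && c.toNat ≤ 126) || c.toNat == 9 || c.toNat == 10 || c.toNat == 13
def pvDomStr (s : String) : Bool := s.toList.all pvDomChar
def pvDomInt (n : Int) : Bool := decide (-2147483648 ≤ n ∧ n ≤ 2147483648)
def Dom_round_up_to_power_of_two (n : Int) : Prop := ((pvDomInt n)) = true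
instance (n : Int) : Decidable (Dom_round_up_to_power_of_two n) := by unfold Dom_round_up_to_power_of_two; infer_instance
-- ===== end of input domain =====

-- B replaces A's power-of-two test plus doubling loop by the closed-form `1 << (n-1).bit_length()`;
-- both raise ValueError for n < 1 (excluded by Pre_), so only return values are compared.

-- ===== PORT A =====
-- `while power < n: power <<= 1`; the `0 < power` conjunct only makes the recursion total
-- (the call site always has power = 1 > 0, doubling keeps it positive).
def round_up_loop (n power : Int) : Int :=
  if h : 0 < power ∧ power < n then round_up_loop n (power * 2) else power
termination_by (n - power).toNat
decreasing_by omega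

def round_up_to_power_of_two (n : Int) : Int :=
  if n < 1 then 0  -- Python raises ValueError here; excluded by Pre_
  else if Int.land n (n - 1) = 0 then n  -- already a power of two
  else round_up_loop n 1

-- ===== PORT B =====
-- `1 << (n - 1).bit_length()`; Python's bit_length on a nonnegative int is Nat.size.
def round_up_to_power_of_two_alt (n : Int) : Int :=
  if n < 1 then 0  -- Python raises ValueError here; excluded by Pre_
  else (1 : Int) <<< (n - 1).toNat.size

-- ===== PRECONDITION & SPEC =====
-- Pre_ excludes exactly n < 1, where both A and B raise ValueError.
def Pre_round_up_to_power_of_two (n : Int) : Prop := 1 ≤ n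
instance (n : Int) : Decidable (Pre_round_up_to_power_of_two n) := by
  unfold Pre_round_up_to_power_of_two; infer_instance

def pvWitness_round_up_to_power_of_two : Int := 5

def Spec_round_up_to_power_of_two (n : Int) (out : Int) : Prop := out = round_up_to_power_of_two_alt n
instance (n : Int) (out : Int) : Decidable (Spec_round_up_to_power_of_two n out) := by unfold Spec_round_up_to_power_of_two; infer_instance

-- ===== CLAIM (what is proved, stated in full; the proofs are below) =====
def Claim_equal_round_up_to_power_of_two : Prop := ∀ (n : Int), Dom_round_up_to_power_of_two n → Pre_round_up_to_power_of_two n → Spec_round_up_to_power_of_two n (round_up_to_power_of_two n)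

-- ===== LEMMAS AND PROOFS =====

-- `m &&& (m-1) = 0` for positive `m` forces `m` to be a power of two.
theorem pow_of_and_pred (m : Nat) (h0 : 0 < m) (h : m &&& (m - 1) = 0) : ∃ k, m = 2 ^ k := by
  induction m using Nat.strong_induction_on with
  | _ m ih =>
    rcases Nat.even_or_odd m with he | ho
    · -- m even: shift right and use the IH
      obtain ⟨a, ha⟩ := he
      have ha2 : m = 2 * a := by omega
      have hapos : 0 < a := by omega
      have hsub : a &&& (a - 1) = 0 := by
        apply Nat.eq_of_testBit_eq
        intro i
        have hb : (m.testBit (i + 1) && (m - 1).testBit (i + 1)) = false := by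
          rw [← Nat.testBit_and, h, Nat.zero_testBit]
        have h1 : m / 2 = a := by omega
        have h2 : (m - 1) / 2 = a - 1 := by omega
        rw [Nat.testBit_add_one, Nat.testBit_add_one, h1, h2] at hb
        simp [Nat.testBit_and, hb]
      obtain ⟨k, hk⟩ := ih a (by omega) hapos hsub
      exact ⟨k + 1, by rw [ha2, hk]; ring⟩
    · -- m odd: either m = 1, or some bit of m/2 is set in both m and m-1
      rcases Nat.lt_or_ge m 2 with h2 | h2
      · exact ⟨0, by omega⟩
      · exfalso
        have hhalf : m / 2 ≠ 0 := by omega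
        have hex : ∃ i, (m / 2).testBit i = true := by
          by_contra hc
          push Not at hc
          exact hhalf (Nat.eq_of_testBit_eq (fun i => by simp [hc i]))
        obtain ⟨i, hi⟩ := hex
        obtain ⟨c, hc⟩ := ho
        have hb : (m.testBit (i + 1) && (m - 1).testBit (i + 1)) = false := by
          rw [← Nat.testBit_and, h, Nat.zero_testBit]
        have h2' : (m - 1) / 2 = m / 2 := by omega
        rw [Nat.testBit_add_one, Nat.testBit_add_one, h2', hi] at hb
        simp at hb

theorem size_pred_pow (k : Nat) : (2 ^ k - 1).size = k := by
  cases k with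
  | zero => simp [Nat.size_zero]
  | succ j =>
    refine Nat.le_antisymm ?_ ?_
    · exact Nat.size_le.mpr (by have := Nat.two_pow_pos (j + 1); omega)
    · have : j < (2 ^ (j + 1) - 1).size := Nat.lt_size.mpr (by
        have h1 : 2 ^ j < 2 ^ (j + 1) := Nat.pow_lt_pow_right (by norm_num) (by omega)
        omega)
      omega

-- the doubling loop, started at 2^k with k ≤ L := (n-1).toNat.size, ends at 2^L
theorem loop_eq (n : Int) (hn : 1 ≤ n) (k : Nat) (hk : k ≤ (n - 1).toNat.size) :
    round_up_loop n (2 ^ k) = 2 ^ ((n - 1).toNat.size) := by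
  set L := (n - 1).toNat.size with hL
  obtain ⟨d, hd⟩ : ∃ d, L = k + d := ⟨L - k, by omega⟩
  clear hk
  induction d generalizing k with
  | zero =>
    have hstop : ¬ ((2 : Int) ^ k < n) := by
      have h1 : (n - 1).toNat < 2 ^ L := Nat.lt_size_self _
      have : ((n - 1).toNat : Int) = n - 1 := by omega
      have h2 : n - 1 < (2 : Int) ^ L := by
        calc n - 1 = ((n - 1).toNat : Int) := this.symm
          _ < ((2 ^ L : Nat) : Int) := by exact_mod_cast h1
          _ = (2 : Int) ^ L := by push_cast; ring
      have hkL : k = L := by omega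
      rw [hkL]; omega
    rw [round_up_loop]
    have hkL : k = L := by omega
    rw [dif_neg (fun hc => hstop hc.2), hkL]
  | succ d ihd =>
    have hkL : k < L := by omega
    have hlt : (2 : Int) ^ k < n := by
      by_contra hge
      push Not at hge
      have h1 : (n - 1).toNat ≤ 2 ^ k - 1 := by
        have h2 : ((2:Nat) ^ k : Int) = (2:Int) ^ k := by push_cast; ring
        omega
      have : L ≤ k := by
        have := Nat.size_le (m := (n - 1).toNat) (n := k)
        exact hL ▸ this.mpr (by have := Nat.two_pow_pos k; omega)
      omega
    rw [round_up_loop]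
    have hcond : 0 < (2:Int) ^ k ∧ (2:Int) ^ k < n := ⟨by positivity, hlt⟩
    rw [dif_pos hcond]
    have : (2:Int) ^ k * 2 = 2 ^ (k + 1) := by ring
    rw [this]
    exact ihd (k + 1) (by omega)

-- ===== VERDICT (by name: the statement is the Claim_ definition above) =====
theorem round_up_to_power_of_two_spec : Claim_equal_round_up_to_power_of_two := by
  intro n _ hpre
  unfold Pre_round_up_to_power_of_two at hpre
  unfold Spec_round_up_to_power_of_two round_up_to_power_of_two round_up_to_power_of_two_alt
  have hnlt : ¬ (n < 1) := by omega
  rw [if_neg hnlt, if_neg hnlt, Int.shiftLeft_eq, one_mul]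
  by_cases hland : Int.land n (n - 1) = 0
  · rw [if_pos hland]
    -- n is a power of two: n = 2^k, and (2^k - 1).size = k
    set m := n.toNat with hm
    have hn : n = (m : Int) := by omega
    have hn1 : n - 1 = ((m - 1 : Nat) : Int) := by omega
    have hcast : Int.land n (n - 1) = (((m &&& (m - 1) : Nat)) : Int) := by rw [hn1, hn]; rfl
    have hnat : m &&& (m - 1) = 0 := by
      have := hcast ▸ hland
      exact_mod_cast this
    obtain ⟨k, hk⟩ := pow_of_and_pred m (by omega) hnat
    have hsz : (n - 1).toNat.size = k := by
      have : (n - 1).toNat = 2 ^ k - 1 := by omega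
      rw [this, size_pred_pow]
    rw [hsz, hn, hk]
    push_cast; ring
  · rw [if_neg hland]
    have := loop_eq n hpre 0 (by omega)
    simpa using this
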